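-- pv_equiv track=rewrite | github.com/GraphicArtQuest/GraphicDocs | src/parse_docstring_functions/get_returns.py | get_returns
-- ===== SOURCE A (Python) =====
-- def get_returns(docstring: str) -> str | None:
--     """
--         Goes through the docstring and looks for the description of the return value annotated by the `@returns` tag.
--
--         If the docstring has more than one of these tags, the function will only record the last `@returns` tag found.
--         If the tag is not included or is left blank, it will return `None`.
--
--         For example:
--         - `@returns This is a description of what the return value does`
--             - Returns: `"This is a description of what the return value does"`
--     """
--
--     parsed = docstring.splitlines()
--
--     desc = ""
--     record_desc = False # Used as a flag to tell if in the process of recording a block of description text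
--
--     for line in parsed:
--         stripped_line = line.strip()
--
--         if stripped_line[0:9] == "@returns ":
--             # Start a new @returns check. Only the last @returns should work, so no check if we've already found one
--             desc = desc.strip()
--             record_desc = True
--
--             # We have encountered a new return description, start recording the info
--             desc = stripped_line[9:len(stripped_line)]
--             continue
--
--         if desc != "" and stripped_line[0:1] == "@" and record_desc:
--             # Already started parsing a parameter, but now encountering a new tag
--             desc = desc.strip()
--             record_desc = False
--             continue
--
--         if desc != "" and record_desc:
--             # Have found a returns tag already, and now its description has spilled on to another line
--             if stripped_line == "": # Add a paragraph break
--                 desc += "\n"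
--             elif desc[-1:] == "\n": # Do not add an extra space for new paragraphs.
--                 desc += stripped_line
--             else:
--                 desc += " " + stripped_line
--
--     if desc != "":   # If trying to .strip() the value 'None', then it will throw an error.
--         return desc.strip()
-- ===== SOURCE B (Python) =====
-- def get_returns(docstring: str) -> str | None:
--     lines = [line.strip() for line in docstring.splitlines()]
--     after = []  # the lines that follow the line currently looked at, in order
--     for line in reversed(lines):
--         if line.startswith("@returns "):
--             # last '@returns ' line found: gather its description from the following lines
--             desc = line[9:]
--             for nxt in after:
--                 if nxt.startswith("@"):
--                     break
--                 if nxt == "":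
--                     desc += "\n"
--                 elif desc.endswith("\n"):
--                     desc += nxt
--                 else:
--                     desc += " " + nxt
--             return desc.strip()
--         after.insert(0, line)
--     return None
-- ===== Notes on version B (the rewrite author's own statement) =====
-- stated objective: simpler
-- what changed: A's single forward scan with a (desc, record_desc) state machine is replaced by a find-last-then-gather decomposition: locate the last stripped line starting with '@returns ', then append only the following lines up to the next '@' tag.
import Mathlib
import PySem

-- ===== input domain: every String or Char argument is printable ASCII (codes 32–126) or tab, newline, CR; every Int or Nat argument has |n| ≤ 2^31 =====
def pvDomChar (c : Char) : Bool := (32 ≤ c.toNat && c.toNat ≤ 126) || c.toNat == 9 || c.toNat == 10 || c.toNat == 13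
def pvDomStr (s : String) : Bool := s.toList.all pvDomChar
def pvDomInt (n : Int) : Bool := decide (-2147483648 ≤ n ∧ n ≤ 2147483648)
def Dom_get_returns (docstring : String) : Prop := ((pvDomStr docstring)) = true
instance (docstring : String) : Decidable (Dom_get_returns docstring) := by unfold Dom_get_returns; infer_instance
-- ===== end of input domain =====

-- B replaces A's forward (desc, record_desc) state machine by "find the LAST '@returns ' line,
-- then gather the following lines until the next '@' tag" (objective: simpler decomposition; not faster).


-- ===== PORT A =====
-- one loop iteration of A: state = (desc, record_desc); the line is stripped inside, as in A
-- (A's dead re-strip of desc just before overwriting it in the first branch is dropped)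
def pvStepA (st : List Char × Bool) (line : List Char) : List Char × Bool :=
  if PySem.Chars.slice (PySem.Chars.strip line) (some 0) (some 9) = "@returns ".toList then
    (PySem.Chars.slice (PySem.Chars.strip line) (some 9)
       (some (PySem.Chars.len (PySem.Chars.strip line))), true)
  else if st.1 ≠ [] ∧ PySem.Chars.slice (PySem.Chars.strip line) (some 0) (some 1) = ['@'] ∧ st.2 = true then
    (PySem.Chars.strip st.1, false)
  else if st.1 ≠ [] ∧ st.2 = true then
    ((if PySem.Chars.strip line = [] then st.1 ++ ['\n']
      else if PySem.Chars.slice st.1 (some (-1)) none = ['\n'] then st.1 ++ PySem.Chars.strip line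
      else st.1 ++ ' ' :: PySem.Chars.strip line), st.2)
  else st

def get_returns (docstring : String) : Option String :=
  if ((PySem.Chars.splitlines docstring.toList).foldl pvStepA ([], false)).1 ≠ [] then
    some (String.ofList (PySem.Chars.strip
      ((PySem.Chars.splitlines docstring.toList).foldl pvStepA ([], false)).1))
  else none

-- ===== PORT B =====
-- B's inner for-loop: append the following lines to desc, stopping at the first '@' tag
def pvGatherB : List Char → List (List Char) → List Char
  | desc, [] => desc
  | desc, l :: rest =>
    if PySem.Chars.startswith l ['@'] then desc
    else pvGatherB (if l = [] then desc ++ ['\n']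
                    else if PySem.Chars.endswith desc ['\n'] then desc ++ l
                    else desc ++ ' ' :: l) rest

-- B's backward scan: `after` accumulates the lines that follow the current one (Source B's
-- `after.insert(0, line)` is the cons below); the first match from the end is the last '@returns '
def pvScanB : List (List Char) → List (List Char) → Option String
  | [], _ => none
  | l :: rs, after =>
    if PySem.Chars.startswith l ("@returns ".toList) then
      some (String.ofList (PySem.Chars.strip
        (pvGatherB (PySem.Chars.slice l (some 9) none) after)))
    else pvScanB rs (l :: after)

def get_returns_alt (docstring : String) : Option String :=
  pvScanB ((PySem.Chars.splitlines docstring.toList).map PySem.Chars.strip).reverse []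

-- ===== PRECONDITION & SPEC =====
def Spec_get_returns (docstring : String) (out : Option String) : Prop := out = get_returns_alt docstring
instance (docstring : String) (out : Option String) : Decidable (Spec_get_returns docstring out) := by unfold Spec_get_returns; infer_instance

-- ===== CLAIM (what is proved, stated in full; the proofs are below) =====
def Claim_equal_get_returns : Prop := ∀ (docstring : String), Dom_get_returns docstring → Spec_get_returns docstring (get_returns docstring)

-- ===== LEMMAS AND PROOFS =====

-- a (stripped) line starts a new @returns description
def pvIsRet (l : List Char) : Prop := PySem.Chars.startswith l ("@returns ".toList) = true

-- proof-side restatement of B's backward scan as a forward recursion ("prefer a later match")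
def pvLR : List (List Char) → List (List Char) → Option String
  | [], _ => none
  | l :: rest, after =>
    match pvLR rest after with
    | some r => some r
    | none =>
      if PySem.Chars.startswith l ("@returns ".toList) then
        some (String.ofList (PySem.Chars.strip
          (pvGatherB (PySem.Chars.slice l (some 9) none) (rest ++ after))))
      else none

lemma pv_take9_iff (l : List Char) :
    PySem.Chars.slice l (some 0) (some 9) = "@returns ".toList ↔ pvIsRet l := by
  have h9 : ((9:Int)).toNat = 9 := rfl
  have hl : ("@returns ".toList).length = 9 := rfl
  rw [pvIsRet, PySem.Chars.startswith_iff, PySem.Chars.slice_eq_listSlice,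
    PySem.List.slice_zero_start, PySem.List.slice_to l (by norm_num : (0:Int) ≤ 9),
    List.prefix_iff_eq_take, h9, hl]
  exact eq_comm

lemma pv_take1_iff (l : List Char) :
    PySem.Chars.slice l (some 0) (some 1) = ['@'] ↔ PySem.Chars.startswith l ['@'] = true := by
  have h1 : ((1:Int)).toNat = 1 := rfl
  have hl : (['@'] : List Char).length = 1 := rfl
  rw [PySem.Chars.startswith_iff, PySem.Chars.slice_eq_listSlice, PySem.List.slice_zero_start,
    PySem.List.slice_to l (by norm_num : (0:Int) ≤ 1), List.prefix_iff_eq_take, h1, hl]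
  exact eq_comm

lemma pv_lastSlice_iff (d : List Char) :
    PySem.Chars.slice d (some (-1)) none = ['\n'] ↔ PySem.Chars.endswith d ['\n'] = true := by
  rw [PySem.Chars.endswith_iff, PySem.Chars.slice_eq_listSlice, PySem.List.slice_from_neg_one]
  induction d with
  | nil => simp
  | cons a t ih =>
    cases t with
    | nil => simp [List.suffix_cons_iff]; exact eq_comm
    | cons b u =>
      simp only [List.length_cons, List.suffix_cons_iff] at *
      constructor
      · intro h
        right
        rw [← ih]; rw [← h]; simp
      · intro h
        rcases h with h | h
        · simp at h
        · rw [← ih] at h; rw [← h]; simp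

lemma pv_slice9len (l : List Char) :
    PySem.Chars.slice l (some 9) (some (PySem.Chars.len l)) = l.drop 9 := by
  rw [PySem.Chars.slice_eq_listSlice]
  rw [show (PySem.Chars.len l) = ((l.length : Nat) : Int) by simp [PySem.Chars.len_eq]]
  rw [PySem.List.slice_toNat l (by norm_num) (Int.natCast_nonneg _)]
  simp

lemma pv_slice9none (l : List Char) :
    PySem.Chars.slice l (some 9) none = l.drop 9 := by
  rw [PySem.Chars.slice_eq_listSlice, PySem.List.slice_from l (by norm_num)]
  rfl

lemma pv_dw_idem (p : Char → Bool) (l : List Char) :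
    List.dropWhile p (List.dropWhile p l) = List.dropWhile p l := by
  rw [List.dropWhile_eq_self_iff]
  intro hl
  exact List.dropWhile_get_zero_not p l hl

lemma pv_head_not (p : Char → Bool) (l : List Char) (h : List.dropWhile p l = l) :
    ∀ c, l.head? = some c → p c = false := by
  cases l with
  | nil => simp
  | cons a t =>
    intro c hc
    simp only [List.head?_cons, Option.some.injEq] at hc
    rw [List.dropWhile_cons] at h
    by_cases hp : p a = true
    · rw [if_pos hp] at h
      have hle := List.length_dropWhile_le p t
      rw [h] at hle
      simp at hle
    · subst hc
      simpa using hp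

lemma pv_lstrip_of_head (u : List Char)
    (h : ∀ c, u.head? = some c → PySem.Chars.isspace c = false) :
    PySem.Chars.lstrip u = u := by
  cases u with
  | nil => rfl
  | cons a t =>
    unfold PySem.Chars.lstrip
    rw [List.dropWhile_cons, if_neg]
    simp [h a rfl]

lemma pv_rstrip_getLast (u : List Char) :
    ∀ c, (PySem.Chars.rstrip u).getLast? = some c → PySem.Chars.isspace c = false := by
  intro c hc
  unfold PySem.Chars.rstrip at hc
  rw [← List.head?_reverse, List.reverse_reverse] at hc
  exact pv_head_not _ _ (pv_dw_idem _ _) c hc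

lemma pv_rstrip_prefix (u : List Char) : PySem.Chars.rstrip u <+: u := by
  unfold PySem.Chars.rstrip
  have h := List.reverse_prefix.mpr (List.dropWhile_suffix (l := u.reverse) PySem.Chars.isspace)
  rwa [List.reverse_reverse] at h

lemma pv_rstrip_rstrip (u : List Char) :
    PySem.Chars.rstrip (PySem.Chars.rstrip u) = PySem.Chars.rstrip u := by
  unfold PySem.Chars.rstrip
  rw [List.reverse_reverse, pv_dw_idem]

lemma pv_rstrip_head (u : List Char)
    (h : ∀ c, u.head? = some c → PySem.Chars.isspace c = false) :
    ∀ c, (PySem.Chars.rstrip u).head? = some c → PySem.Chars.isspace c = false := by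
  intro c hc
  obtain ⟨r, hr⟩ := pv_rstrip_prefix u
  apply h
  rw [← hr, List.head?_append, hc]
  rfl

lemma pv_strip_idem (s : List Char) :
    PySem.Chars.strip (PySem.Chars.strip s) = PySem.Chars.strip s := by
  unfold PySem.Chars.strip
  have hh := pv_head_not PySem.Chars.isspace (PySem.Chars.lstrip s)
    (by unfold PySem.Chars.lstrip; exact pv_dw_idem _ _)
  rw [pv_lstrip_of_head _ (pv_rstrip_head _ hh), pv_rstrip_rstrip]

lemma pv_strip_eq_nil_iff (s : List Char) :
    PySem.Chars.strip s = [] ↔ ∀ c ∈ s, PySem.Chars.isspace c = true := by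
  unfold PySem.Chars.strip PySem.Chars.rstrip PySem.Chars.lstrip
  rw [List.reverse_eq_nil_iff, List.dropWhile_eq_nil_iff]
  constructor
  · intro h c hc
    have hc' : c ∈ List.takeWhile PySem.Chars.isspace s ++ List.dropWhile PySem.Chars.isspace s := by
      rw [List.takeWhile_append_dropWhile]; exact hc
    rcases List.mem_append.mp hc' with h1 | h2
    · exact List.mem_takeWhile_imp h1
    · exact h c (List.mem_reverse.mpr h2)
  · intro h c hc
    exact h c ((List.dropWhile_suffix _).subset (List.mem_reverse.mp hc))

lemma pv_strip_append_ne_nil (d x : List Char) (h : PySem.Chars.strip d ≠ []) :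
    PySem.Chars.strip (d ++ x) ≠ [] := by
  intro hnil
  apply h
  rw [pv_strip_eq_nil_iff] at hnil ⊢
  intro c hc
  exact hnil c (List.mem_append.mpr (Or.inl hc))

-- a stripped '@returns ' line has a 10th character, and its tail is not all whitespace
lemma pv_retStart (m : List Char) (hstr : PySem.Chars.strip m = m) (hret : pvIsRet m) :
    PySem.Chars.strip (m.drop 9) ≠ [] := by
  have hpre : ("@returns ".toList) <+: m := (PySem.Chars.startswith_iff _ _).mp hret
  have h9 : 9 ≤ m.length := by
    have := hpre.length_le
    simpa using this
  -- lstrip m = m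
  have hlen1 : (PySem.Chars.strip m).length ≤ (PySem.Chars.lstrip m).length := by
    unfold PySem.Chars.strip PySem.Chars.rstrip
    rw [List.length_reverse]
    have := List.length_dropWhile_le PySem.Chars.isspace (PySem.Chars.lstrip m).reverse
    simpa using this
  have hlstrip : PySem.Chars.lstrip m = m := by
    apply (List.dropWhile_suffix _).eq_of_length
    have h2 := List.length_dropWhile_le PySem.Chars.isspace m
    rw [hstr] at hlen1
    unfold PySem.Chars.lstrip at hlen1
    omega
  have hrstrip : PySem.Chars.rstrip m = m := by
    have := hstr
    unfold PySem.Chars.strip at this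
    rwa [hlstrip] at this
  have hgl : ∀ c, m.getLast? = some c → PySem.Chars.isspace c = false := by
    intro c hc
    apply pv_rstrip_getLast m
    rw [hrstrip]
    exact hc
  -- m.length ≠ 9
  have hne9 : m.length ≠ 9 := by
    intro he
    have hm : m = "@returns ".toList := (hpre.eq_of_length (by rw [he]; rfl)).symm
    have : PySem.Chars.isspace ' ' = false := by
      apply hgl
      rw [hm]
      rfl
    simp [show PySem.Chars.isspace ' ' = true by decide] at this
  have h10 : 9 < m.length := by omega
  have hdne : m.drop 9 ≠ [] := by
    intro h
    have hlen := congrArg List.length h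
    simp [List.length_drop] at hlen
    omega
  -- last of drop = last of m
  obtain ⟨c, hc⟩ : ∃ c, (m.drop 9).getLast? = some c := by
    cases h : (m.drop 9).getLast? with
    | some c => exact ⟨c, rfl⟩
    | none => exact absurd (List.getLast?_eq_none_iff.mp h) hdne
  have hcm : m.getLast? = some c := by
    obtain ⟨r, hr⟩ := List.drop_suffix 9 m
    rw [← hr, List.getLast?_append, hc]
    rfl
  have hcns := hgl c hcm
  intro hnil
  rw [pv_strip_eq_nil_iff] at hnil
  have := hnil c (List.mem_of_getLast? hc)
  rw [this] at hcns
  simp at hcns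

lemma pv_stepA_of_ret (st : List Char × Bool) (s : List Char)
    (h : pvIsRet (PySem.Chars.strip s)) :
    pvStepA st s = ((PySem.Chars.strip s).drop 9, true) := by
  unfold pvStepA
  rw [if_pos ((pv_take9_iff _).mpr h), pv_slice9len]

lemma pv_stepA_no (st : List Char × Bool) (s : List Char)
    (h1 : ¬ pvIsRet (PySem.Chars.strip s)) (h2 : st.1 = [] ∨ st.2 = false) :
    pvStepA st s = st := by
  unfold pvStepA
  rw [if_neg (fun hc => h1 ((pv_take9_iff _).mp hc)), if_neg, if_neg]
  · rcases h2 with he | hf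
    · exact fun hc => hc.1 he
    · exact fun hc => by rw [hf] at hc; exact Bool.false_ne_true hc.2
  · rcases h2 with he | hf
    · exact fun hc => hc.1 he
    · exact fun hc => by rw [hf] at hc; exact Bool.false_ne_true hc.2.2

lemma pv_stepA_strip (st : List Char × Bool) (l : List Char) :
    pvStepA st (PySem.Chars.strip l) = pvStepA st l := by
  unfold pvStepA
  rw [pv_strip_idem]

lemma pv_frozen (L : List (List Char)) (d : List Char)
    (hnm : ∀ s ∈ L, ¬ pvIsRet (PySem.Chars.strip s)) :
    L.foldl pvStepA (d, false) = (d, false) := by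
  induction L with
  | nil => rfl
  | cons s rest ih =>
    rw [List.foldl_cons, pv_stepA_no _ _ (hnm s (List.mem_cons_self)) (Or.inr rfl)]
    exact ih (fun t ht => hnm t (List.mem_cons_of_mem _ ht))

lemma pv_gather (L : List (List Char)) : ∀ (d : List Char),
    (∀ s ∈ L, PySem.Chars.strip s = s) →
    (∀ s ∈ L, ¬ pvIsRet s) →
    PySem.Chars.strip d ≠ [] →
    (L.foldl pvStepA (d, true)).1 ≠ [] ∧
      PySem.Chars.strip (L.foldl pvStepA (d, true)).1 =
        PySem.Chars.strip (pvGatherB d L) := by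
  induction L with
  | nil =>
    intro d _ _ hd
    refine ⟨fun h => hd ?_, rfl⟩
    simp only [List.foldl_nil] at h
    rw [h]
    rfl
  | cons s rest ih =>
    intro d hstr hnm hd
    have hs : PySem.Chars.strip s = s := hstr s List.mem_cons_self
    have hns : ¬ pvIsRet s := hnm s List.mem_cons_self
    have hd0 : d ≠ [] := fun h => hd (by rw [h]; rfl)
    by_cases hA : PySem.Chars.startswith s ['@'] = true
    · have hstep : pvStepA (d, true) s = (PySem.Chars.strip d, false) := by
        unfold pvStepA
        rw [hs, if_neg (fun hc => hns ((pv_take9_iff _).mp hc)),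
          if_pos ⟨hd0, (pv_take1_iff s).mpr hA, rfl⟩]
      have hfr : ∀ t ∈ rest, ¬ pvIsRet (PySem.Chars.strip t) := by
        intro t ht
        rw [hstr t (List.mem_cons_of_mem _ ht)]
        exact hnm t (List.mem_cons_of_mem _ ht)
      rw [List.foldl_cons, hstep, pv_frozen rest _ hfr]
      refine ⟨hd, ?_⟩
      rw [pv_strip_idem]
      simp only [pvGatherB, if_pos hA]
    · have hstep : pvStepA (d, true) s =
          ((if s = [] then d ++ ['\n']
            else if PySem.Chars.endswith d ['\n'] = true then d ++ s
            else d ++ ' ' :: s), true) := by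
        unfold pvStepA
        rw [hs, if_neg (fun hc => hns ((pv_take9_iff _).mp hc)),
          if_neg (fun hc => hA ((pv_take1_iff s).mp hc.2.1)),
          if_pos ⟨hd0, rfl⟩]
        simp only [pv_lastSlice_iff]
      have hgather : pvGatherB d (s :: rest) =
          pvGatherB (if s = [] then d ++ ['\n']
            else if PySem.Chars.endswith d ['\n'] = true then d ++ s
            else d ++ ' ' :: s) rest := by
        simp only [pvGatherB, if_neg hA]
      rw [List.foldl_cons, hstep, hgather]
      apply ih _ (fun t ht => hstr t (List.mem_cons_of_mem _ ht))
        (fun t ht => hnm t (List.mem_cons_of_mem _ ht))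
      split_ifs with h1 h2
      · exact pv_strip_append_ne_nil _ _ hd
      · exact pv_strip_append_ne_nil _ _ hd
      · exact pv_strip_append_ne_nil _ _ hd

lemma pv_stateIndep (L : List (List Char)) : ∀ (st st' : List Char × Bool),
    (∃ s ∈ L, pvIsRet (PySem.Chars.strip s)) →
    L.foldl pvStepA st = L.foldl pvStepA st' := by
  induction L with
  | nil => intro _ _ h; simp at h
  | cons s rest ih =>
    intro st st' h
    rw [List.foldl_cons, List.foldl_cons]
    by_cases hr : pvIsRet (PySem.Chars.strip s)
    · rw [pv_stepA_of_ret st s hr, pv_stepA_of_ret st' s hr]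
    · rcases h with ⟨t, ht, htr⟩
      rcases List.mem_cons.mp ht with rfl | ht'
      · exact absurd htr hr
      · exact ih _ _ ⟨t, ht', htr⟩

lemma pv_lastRet_none (L : List (List Char)) (after : List (List Char))
    (h : ∀ s ∈ L, ¬ pvIsRet s) :
    pvLR L after = none := by
  induction L with
  | nil => rfl
  | cons s rest ih =>
    have hrest := ih (fun t ht => h t (List.mem_cons_of_mem _ ht))
    simp only [pvLR, hrest]
    rw [if_neg (show ¬ (PySem.Chars.startswith s ("@returns ".toList) = true) from
      h s List.mem_cons_self)]

lemma pv_lastRet_isSome (L : List (List Char)) (after : List (List Char))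
    (h : ∃ s ∈ L, pvIsRet s) :
    ∃ r, pvLR L after = some r := by
  induction L with
  | nil => simp at h
  | cons s rest ih =>
    cases hr : pvLR rest after with
    | some r => exact ⟨r, by simp only [pvLR, hr]⟩
    | none =>
      rcases h with ⟨t, ht, htr⟩
      rcases List.mem_cons.mp ht with rfl | ht'
      · refine ⟨String.ofList (PySem.Chars.strip
          (pvGatherB (PySem.Chars.slice t (some 9) none) (rest ++ after))), ?_⟩
        simp only [pvLR, hr]
        rw [if_pos (show PySem.Chars.startswith t ("@returns ".toList) = true from htr)]
      · obtain ⟨r, hrr⟩ := ih ⟨t, ht', htr⟩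
        rw [hrr] at hr
        exact absurd hr (by simp)

lemma pv_main (L : List (List Char)) (hstr : ∀ s ∈ L, PySem.Chars.strip s = s) :
    (if (L.foldl pvStepA ([], false)).1 ≠ [] then
       some (String.ofList (PySem.Chars.strip (L.foldl pvStepA ([], false)).1))
     else none) = pvLR L [] := by
  induction L with
  | nil => rfl
  | cons s rest ih =>
    have hs : PySem.Chars.strip s = s := hstr s List.mem_cons_self
    have hstr' : ∀ t ∈ rest, PySem.Chars.strip t = t :=
      fun t ht => hstr t (List.mem_cons_of_mem _ ht)
    by_cases hm : ∃ t ∈ rest, pvIsRet t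
    · -- a later '@returns ' line decides everything
      have hind : (s :: rest).foldl pvStepA ([], false) = rest.foldl pvStepA ([], false) := by
        rw [List.foldl_cons]
        apply pv_stateIndep
        rcases hm with ⟨t, ht, htr⟩
        exact ⟨t, ht, by rw [hstr' t ht]; exact htr⟩
      rw [hind, ih hstr']
      obtain ⟨r, hr⟩ := pv_lastRet_isSome rest [] hm
      rw [hr]
      simp only [pvLR, hr]
    · have hnm : ∀ t ∈ rest, ¬ pvIsRet t := by
        intro t ht htr
        exact hm ⟨t, ht, htr⟩
      have hrest : pvLR rest [] = none := pv_lastRet_none rest [] hnm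
      by_cases hret : pvIsRet s
      · have hstep : pvStepA ([], false) s = (s.drop 9, true) := by
          rw [pv_stepA_of_ret _ s (by rw [hs]; exact hret), hs]
        obtain ⟨hne, heq⟩ := pv_gather rest (s.drop 9) hstr' hnm
          (pv_retStart s hs hret)
        rw [List.foldl_cons, hstep, if_pos hne]
        simp only [pvLR, hrest]
        rw [if_pos (show PySem.Chars.startswith s ("@returns ".toList) = true from hret),
          heq, pv_slice9none, List.append_nil]
      · have hstep : pvStepA ([], false) s = ([], false) :=
          pv_stepA_no _ s (by rw [hs]; exact hret) (Or.inl rfl)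
        rw [List.foldl_cons, hstep, ih hstr']
        rw [hrest]
        simp only [pvLR, hrest]
        rw [if_neg (show ¬ (PySem.Chars.startswith s ("@returns ".toList) = true) from hret)]

lemma pvLR_snoc (x : List Char) (M : List (List Char)) : ∀ after,
    pvLR (M ++ [x]) after =
      if PySem.Chars.startswith x ("@returns ".toList) then
        some (String.ofList (PySem.Chars.strip
          (pvGatherB (PySem.Chars.slice x (some 9) none) after)))
      else pvLR M (x :: after) := by
  induction M with
  | nil =>
    intro after
    simp [pvLR]
  | cons m M' ih =>
    intro after
    simp only [List.cons_append, pvLR]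
    rw [ih after]
    by_cases hx : PySem.Chars.startswith x ("@returns ".toList) = true
    · rw [if_pos hx, if_pos hx]
    · rw [if_neg hx, if_neg hx]
      cases hLR : pvLR M' (x :: after) with
      | some r => rfl
      | none =>
        have : (M' ++ [x]) ++ after = M' ++ x :: after := by
          simp [List.append_assoc]
        rw [this]

lemma pv_scan_eq (L : List (List Char)) : ∀ after,
    pvScanB L.reverse after = pvLR L after := by
  induction L using List.reverseRecOn with
  | nil => intro after; rfl
  | append_singleton M x ih =>
    intro after
    rw [List.reverse_append, List.reverse_singleton, List.singleton_append, pvLR_snoc]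
    simp only [pvScanB]
    by_cases hx : PySem.Chars.startswith x ("@returns ".toList) = true
    · rw [if_pos hx, if_pos hx]
    · rw [if_neg hx, if_neg hx, ih]

-- ===== VERDICT (by name: the statement is the Claim_ definition above) =====
theorem get_returns_spec : Claim_equal_get_returns := by
  intro docstring _
  unfold Spec_get_returns get_returns get_returns_alt
  have h1 : (PySem.Chars.splitlines docstring.toList).foldl pvStepA ([], false)
      = ((PySem.Chars.splitlines docstring.toList).map PySem.Chars.strip).foldl pvStepA ([], false) := by
    rw [List.foldl_map]
    simp only [pv_stepA_strip]
  rw [h1, pv_scan_eq]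
  exact pv_main _ (by
    intro t ht
    obtain ⟨u, _, rfl⟩ := List.mem_map.mp ht
    exact pv_strip_idem u)
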